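-- pv_equiv track=rewrite | github.com/xenserver/python-libs | xcp/net/biosdevname.py | has_ppn_quirks
-- ===== SOURCE A (Python) =====
-- def has_ppn_quirks(bdn_dicts):
--     # CA-75599 - Assert that no devices share the same SMBIOS Instance.  Some
--     # BIOSes have multiple different NICs with the same value set, which causes
--     # biosdevname to mis-name its physical policy names (emXX, pciXpX etc)
--
--     smbios_instances = set()
--
--     for info in bdn_dicts:
--
--         instance = info.get("SMBIOS Instance", None)
--
--         if instance:
--             if instance in smbios_instances:
--                 return True
--             else:
--                 smbios_instances.add(instance)
--
--     return False
-- ===== SOURCE B (Python) =====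
-- def has_ppn_quirks(bdn_dicts):
--     # Build the list of all truthy SMBIOS Instance values, then compare
--     # against the deduplicated count: duplicates exist iff they differ.
--     instances = [info.get("SMBIOS Instance") for info in bdn_dicts
--                  if info.get("SMBIOS Instance")]
--     return len(set(instances)) != len(instances)
-- ===== Notes on version B (the rewrite author's own statement) =====
-- stated objective: simpler
-- what changed: Replaces the stateful seen-set loop with early return by a build-all-then-count decomposition: collect the truthy SMBIOS Instance values in one comprehension and report duplicates as len(set(instances)) != len(instances).
import Mathlib
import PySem

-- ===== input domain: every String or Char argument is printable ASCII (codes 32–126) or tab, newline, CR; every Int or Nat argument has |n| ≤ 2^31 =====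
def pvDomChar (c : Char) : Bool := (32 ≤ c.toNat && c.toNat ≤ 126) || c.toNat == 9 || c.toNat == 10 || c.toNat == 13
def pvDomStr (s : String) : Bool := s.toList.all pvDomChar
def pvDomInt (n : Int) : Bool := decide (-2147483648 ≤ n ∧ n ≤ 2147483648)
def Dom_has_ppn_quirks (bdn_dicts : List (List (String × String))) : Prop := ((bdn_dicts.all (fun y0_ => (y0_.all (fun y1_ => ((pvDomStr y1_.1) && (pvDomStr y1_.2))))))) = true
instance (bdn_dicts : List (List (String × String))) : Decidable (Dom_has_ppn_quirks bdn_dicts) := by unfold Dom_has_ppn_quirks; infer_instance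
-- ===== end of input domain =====

-- B replaces A's incremental seen-set loop with early return by collecting all truthy
-- SMBIOS Instance values and comparing the deduplicated count with the list length (simpler).

-- ===== PORT A =====
-- info.get(k, None) on the assoc-list dict: first matching key (exact per the type convention)
def pyDictGet? (info : List (String × String)) (k : String) : Option String :=
  (info.find? (fun kv => kv.1 == k)).map (fun kv => kv.2)

-- the for-loop with its early 'return True', carrying the 'smbios_instances' set
def has_ppn_quirks_loop (rest : List (List (String × String)))
    (smbios_instances : PySem.Set String) : Bool :=
  match rest with
  | [] => false
  | info :: rest' =>
    match pyDictGet? info "SMBIOS Instance" with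
    | none => has_ppn_quirks_loop rest' smbios_instances
    | some inst =>
      if inst ≠ "" then
        if PySem.Set.contains smbios_instances inst then true
        else has_ppn_quirks_loop rest' (PySem.Set.add smbios_instances inst)
      else has_ppn_quirks_loop rest' smbios_instances

def has_ppn_quirks (bdn_dicts : List (List (String × String))) : Bool :=
  has_ppn_quirks_loop bdn_dicts PySem.Set.empty

-- ===== PORT B =====
-- the comprehension '[info.get("SMBIOS Instance") for info in bdn_dicts if info.get("SMBIOS Instance")]'
def pyInstances (bdn_dicts : List (List (String × String))) : List String :=
  bdn_dicts.filterMap (fun info =>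
    match pyDictGet? info "SMBIOS Instance" with
    | some inst => if inst ≠ "" then some inst else none
    | none => none)

def has_ppn_quirks_alt (bdn_dicts : List (List (String × String))) : Bool :=
  decide ((PySem.Set.ofList (pyInstances bdn_dicts)).length ≠ (pyInstances bdn_dicts).length)

-- ===== PRECONDITION & SPEC =====
def Spec_has_ppn_quirks (bdn_dicts : List (List (String × String))) (out : Bool) : Prop := out = has_ppn_quirks_alt bdn_dicts
instance (bdn_dicts : List (List (String × String))) (out : Bool) : Decidable (Spec_has_ppn_quirks bdn_dicts out) := by unfold Spec_has_ppn_quirks; infer_instance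

-- ===== CLAIM (what is proved, stated in full; the proofs are below) =====
def Claim_equal_has_ppn_quirks : Prop := ∀ (bdn_dicts : List (List (String × String))), Dom_has_ppn_quirks bdn_dicts → Spec_has_ppn_quirks bdn_dicts (has_ppn_quirks bdn_dicts)

-- ===== LEMMAS AND PROOFS =====

-- folding Set.add grows the accumulator by at most one per element
theorem pv_len_foldl_add_le (xs : List String) (s : PySem.Set String) :
    (xs.foldl PySem.Set.add s).length ≤ s.length + xs.length := by
  induction xs generalizing s with
  | nil => simp
  | cons x t ih =>
    simp only [List.foldl_cons]
    calc (t.foldl PySem.Set.add (PySem.Set.add s x)).length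
        ≤ (PySem.Set.add s x).length + t.length := ih _
      _ ≤ s.length + (x :: t).length := by
          simp only [PySem.Set.add]
          split
          · simp
          · simp only [List.length_append, List.length_nil, List.length_cons]
            omega

-- A's loop, with accumulator 'seen', is B's count test on the remaining instances
theorem pv_loop_eq (rest : List (List (String × String))) (seen : PySem.Set String) :
    has_ppn_quirks_loop rest seen =
      decide (((rest.filterMap (fun info =>
        match pyDictGet? info "SMBIOS Instance" with
        | some inst => if inst ≠ "" then some inst else none
        | none => none)).foldl PySem.Set.add seen).length ≠
          seen.length + (rest.filterMap (fun info =>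
        match pyDictGet? info "SMBIOS Instance" with
        | some inst => if inst ≠ "" then some inst else none
        | none => none)).length) := by
  induction rest generalizing seen with
  | nil => simp [has_ppn_quirks_loop]
  | cons info rest' ih =>
    cases hg : pyDictGet? info "SMBIOS Instance" with
    | none =>
      simp only [has_ppn_quirks_loop, hg, List.filterMap_cons]
      simpa using ih seen
    | some inst =>
      by_cases hne : inst ≠ ""
      · simp only [has_ppn_quirks_loop, hg, List.filterMap_cons, if_pos hne]
        by_cases hc : PySem.Set.contains seen inst
        · -- early return True: the accumulator does not grow on inst
          simp only [if_pos hc]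
          have hmem : inst ∈ seen := by simpa using hc
          have hadd : PySem.Set.add seen inst = seen := by
            simp [PySem.Set.add, hmem]
          have hle := pv_len_foldl_add_le (rest'.filterMap (fun info =>
            match pyDictGet? info "SMBIOS Instance" with
            | some inst => if inst ≠ "" then some inst else none
            | none => none)) seen
          simp only [List.foldl_cons, hadd, List.length_cons]
          symm
          simp only [decide_eq_true_eq]
          omega
        · simp only [if_neg hc]
          have hmem : inst ∉ seen := by simpa using hc
          have hadd : PySem.Set.add seen inst = seen ++ [inst] := by
            simp [PySem.Set.add, hmem]
          rw [ih (PySem.Set.add seen inst)]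
          simp only [List.foldl_cons, hadd, List.length_append, List.length_cons,
            List.length_nil]
          congr 1
          simp only [eq_iff_iff, ne_eq, not_iff_not]
          omega
      · simp only [has_ppn_quirks_loop, hg, List.filterMap_cons, if_neg hne]
        simpa using ih seen

-- ===== VERDICT (by name: the statement is the Claim_ definition above) =====
theorem has_ppn_quirks_spec : Claim_equal_has_ppn_quirks := by
  intro bdn_dicts _
  unfold Spec_has_ppn_quirks has_ppn_quirks has_ppn_quirks_alt pyInstances
  rw [pv_loop_eq, PySem.Set.ofList_eq_foldl]
  simp [PySem.Set.empty]
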